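-- pv_equiv track=rewrite | github.com/W-46ec/LeetCode | Algorithms/Python3/02563-Count the Number of Fair Pairs.py | countPairsLessEq
-- ===== SOURCE A (Python) =====
-- from typing import List
--
-- def countPairsLessEq(nums: List[int], upper: int) -> int:
--     """
--     Count the number of pairs less than or equal to upper.
--     """
--     i, j, count = 0, len(nums) - 1, 0
--     while i < j:
--         if nums[i] + nums[j] > upper:
--             j -= 1
--         else:
--             count += j - i
--             i += 1
--     return count
-- ===== SOURCE B (Python) =====
-- import bisect
-- from typing import List
--
-- def countPairsLessEq(nums: List[int], upper: int) -> int: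
--     """
--     Count the number of pairs less than or equal to upper (nums sorted).
--     """
--     total = 0
--     for i, x in enumerate(nums):
--         pos = bisect.bisect_right(nums, upper - x)
--         total += max(0, pos - i - 1)
--     return total
-- ===== Notes on version B (the rewrite author's own statement) =====
-- stated objective: alternative
-- what changed: Replaces the cooperative two-pointer sweep by independent per-element binary searches: for each i, bisect_right finds how many values fit under upper - nums[i] and max(0, pos - i - 1) counts the partners j > i.
-- outside the precondition, e.g. on countPairsLessEq([3, 1, 2], 3): A returns 0, B returns 1
import Mathlib
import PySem

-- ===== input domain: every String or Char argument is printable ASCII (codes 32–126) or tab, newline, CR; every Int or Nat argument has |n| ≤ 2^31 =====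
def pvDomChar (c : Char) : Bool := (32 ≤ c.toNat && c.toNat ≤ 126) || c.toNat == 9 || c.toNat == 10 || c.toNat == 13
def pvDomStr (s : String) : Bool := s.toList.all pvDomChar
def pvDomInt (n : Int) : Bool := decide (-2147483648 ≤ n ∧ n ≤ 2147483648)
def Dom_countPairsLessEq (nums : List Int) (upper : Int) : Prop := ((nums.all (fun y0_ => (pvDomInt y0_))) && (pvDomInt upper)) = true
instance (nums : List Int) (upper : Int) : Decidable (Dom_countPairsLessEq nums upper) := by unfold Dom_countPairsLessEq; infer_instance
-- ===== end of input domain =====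

-- B replaces A's cooperative two-pointer sweep by an independent bisect_right search per
-- element (alternative algorithm, same results on the sorted inputs the function is for).

-- ===== PORT A =====
-- the while loop; indexing via pyGet? (in the loop 0 ≤ i < j ≤ len-1, so it never misses;
-- .getD 0 is unreachable)
def pvALoop (nums : List Int) (upper : Int) (i j count : Int) : Int :=
  if i < j then
    if (PySem.List.pyGet? nums i).getD 0 + (PySem.List.pyGet? nums j).getD 0 > upper then
      pvALoop nums upper i (j - 1) count
    else
      pvALoop nums upper (i + 1) j (count + (j - i))
  else count
termination_by (j - i).toNat
decreasing_by all_goals omega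

def countPairsLessEq (nums : List Int) (upper : Int) : Int :=
  pvALoop nums upper 0 ((nums.length : Int) - 1) 0

-- ===== PORT B =====
-- bisect.bisect_right is PySem.List.bisectRight; for i, x in enumerate(nums) is a foldl
-- over PySem.List.enumerate
def countPairsLessEq_alt (nums : List Int) (upper : Int) : Int :=
  (PySem.List.enumerate nums).foldl
    (fun total p =>
      total + max 0 ((PySem.List.bisectRight nums (upper - p.2) : Int) - p.1 - 1)) 0

-- ===== PRECONDITION & SPEC =====
-- Pre_ excludes unsorted lists of length ≥ 3: the function's contract (pair counting by
-- a two-pointer sweep / binary search) presumes sorted input, and on longer unsorted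
-- lists A's sweep returns an accidental value no independent implementation would produce
-- (on lists of length ≤ 2 the two agree regardless of order, so those stay inside).
def Pre_countPairsLessEq (nums : List Int) (upper : Int) : Prop :=
  List.Pairwise (· ≤ ·) nums ∨ nums.length ≤ 2

instance (nums : List Int) (upper : Int) : Decidable (Pre_countPairsLessEq nums upper) := by
  unfold Pre_countPairsLessEq; infer_instance

def pvWitness_countPairsLessEq : List Int × Int := ([1, 2, 3], 4)

def Spec_countPairsLessEq (nums : List Int) (upper : Int) (out : Int) : Prop := out = countPairsLessEq_alt nums upper
instance (nums : List Int) (upper : Int) (out : Int) : Decidable (Spec_countPairsLessEq nums upper out) := by unfold Spec_countPairsLessEq; infer_instance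

-- ===== CLAIM (what is proved, stated in full; the proofs are below) =====
def Claim_equal_countPairsLessEq : Prop := ∀ (nums : List Int) (upper : Int), Dom_countPairsLessEq nums upper → Pre_countPairsLessEq nums upper → Spec_countPairsLessEq nums upper (countPairsLessEq nums upper)

-- ===== LEMMAS AND PROOFS =====

-- the set of index pairs (a, b), i ≤ a < b ≤ j, whose values sum to at most upper
def pvW (nums : List Int) (upper : Int) (i j : Int) : Finset (Nat × Nat) :=
  (Finset.range nums.length ×ˢ Finset.range nums.length).filter
    (fun p => i ≤ (p.1 : Int) ∧ p.1 < p.2 ∧ (p.2 : Int) ≤ j ∧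
      nums.getD p.1 0 + nums.getD p.2 0 ≤ upper)

lemma pvGetD0 (nums : List Int) (i : Int) (h0 : 0 ≤ i) (h1 : i < nums.length) :
    (PySem.List.pyGet? nums i).getD 0 = nums.getD i.toNat 0 := by
  simp [PySem.List.pyGet?, PySem.List.pyIdx?, h0, h1, List.getD]

lemma pvMono (nums : List Int) (h : List.Pairwise (· ≤ ·) nums) {a b : Nat}
    (hab : a ≤ b) (hb : b < nums.length) : nums.getD a 0 ≤ nums.getD b 0 := by
  rcases Nat.lt_or_ge a b with hlt | hge
  · rw [List.getD_eq_getElem _ _ (by omega), List.getD_eq_getElem _ _ hb]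
    exact List.pairwise_iff_getElem.mp h a b (by omega) hb hlt
  · have : a = b := by omega
    subst this; rfl

lemma pvALoop_eq (nums : List Int) (upper : Int) (h : List.Pairwise (· ≤ ·) nums) :
    ∀ (i j count : Int), 0 ≤ i → j < nums.length →
      pvALoop nums upper i j count = count + ((pvW nums upper i j).card : Int) := by
  intro i j count
  fun_induction pvALoop nums upper i j count with
  | case1 i j count hij hsum ih =>
    -- nums[i] + nums[j] > upper : the column b = j holds no valid pair
    intro hi hj
    have hiN : (i.toNat : Int) = i := Int.toNat_of_nonneg hi
    have hjN : (j.toNat : Int) = j := Int.toNat_of_nonneg (by omega)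
    rw [pvGetD0 nums i hi (by omega), pvGetD0 nums j (by omega) hj] at hsum
    have hW : pvW nums upper i (j - 1) = pvW nums upper i j := by
      unfold pvW
      apply Finset.filter_congr
      rintro ⟨a, b⟩ hp
      simp only [Finset.mem_product, Finset.mem_range] at hp
      constructor
      · rintro ⟨h1, h2, h3, h4⟩; exact ⟨h1, h2, by omega, h4⟩
      · rintro ⟨h1, h2, h3, h4⟩
        refine ⟨h1, h2, ?_, h4⟩
        by_contra hbj
        have hb : b = j.toNat := by omega
        subst hb
        have : nums.getD i.toNat 0 ≤ nums.getD a 0 := pvMono nums h (by omega) (by omega)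
        simp only at h4
        omega
    rw [ih hi (by omega), hW]
  | case2 i j count hij hsum ih =>
    -- nums[i] + nums[j] ≤ upper : the row a = i contributes exactly j - i pairs
    intro hi hj
    have hiN : (i.toNat : Int) = i := Int.toNat_of_nonneg hi
    have hjN : (j.toNat : Int) = j := Int.toNat_of_nonneg (by omega)
    rw [ih (by omega) hj]
    rw [pvGetD0 nums i hi (by omega), pvGetD0 nums j (by omega) hj] at hsum
    have hsplit :
        ((pvW nums upper i j).filter (fun p => p.1 = i.toNat)).card +
        ((pvW nums upper i j).filter (fun p => ¬ p.1 = i.toNat)).card =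
        (pvW nums upper i j).card :=
      by apply Finset.card_filter_add_card_filter_not
    have hrest : (pvW nums upper i j).filter (fun p => ¬ p.1 = i.toNat) =
        pvW nums upper (i + 1) j := by
      unfold pvW
      rw [Finset.filter_filter]
      apply Finset.filter_congr
      rintro ⟨a, b⟩ hp
      simp only [Finset.mem_product, Finset.mem_range] at hp
      constructor
      · rintro ⟨⟨h1, h2, h3, h4⟩, h5⟩
        exact ⟨by omega, h2, h3, h4⟩
      · rintro ⟨h1, h2, h3, h4⟩
        exact ⟨⟨by omega, h2, h3, h4⟩, by omega⟩
    have hrow : (pvW nums upper i j).filter (fun p => p.1 = i.toNat) =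
        (Finset.Ioc i.toNat j.toNat).image (fun b => (i.toNat, b)) := by
      unfold pvW
      ext ⟨a, b⟩
      simp only [Finset.mem_filter, Finset.mem_product, Finset.mem_range,
        Finset.mem_image, Finset.mem_Ioc, Prod.mk.injEq]
      constructor
      · rintro ⟨⟨⟨ha, hb⟩, h1, h2, h3, h4⟩, h5⟩
        exact ⟨b, ⟨by omega, by omega⟩, by omega, rfl⟩
      · rintro ⟨b', ⟨hb1, hb2⟩, ha, hb⟩
        subst ha; subst hb
        have hbn : b' < nums.length := by omega
        have : nums.getD b' 0 ≤ nums.getD j.toNat 0 := pvMono nums h (by omega) (by omega)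
        refine ⟨⟨⟨by omega, hbn⟩, by omega, by omega, by omega, by omega⟩, rfl⟩
    have hrowcard : ((pvW nums upper i j).filter (fun p => p.1 = i.toNat)).card =
        (j - i).toNat := by
      rw [hrow, Finset.card_image_of_injective _ (fun x y hxy => by
        simpa using hxy), Nat.card_Ioc]
      omega
    rw [hrest, hrowcard] at hsplit
    omega
  | case3 i j count hij =>
    intro hi hj
    have : pvW nums upper i j = ∅ := by
      unfold pvW
      rw [Finset.filter_eq_empty_iff]
      rintro ⟨a, b⟩ hp ⟨h1, h2, h3, h4⟩
      omega
    simp [this]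

-- a sum over enumerate(nums) as a Finset.range sum over indices
lemma pvSumEnum (nums : List Int) (f : Int → Int → Int) :
    ∀ (s : Int), ((PySem.List.enumerate nums s).map (fun p => f p.1 p.2)).sum =
      ∑ a ∈ Finset.range nums.length, f (s + a) (nums.getD a 0) := by
  induction nums with
  | nil => intro s; simp [PySem.List.enumerate_nil]
  | cons x xs ih =>
    intro s
    rw [PySem.List.enumerate_cons]
    simp only [List.map_cons, List.sum_cons, ih (s + 1), List.length_cons]
    rw [Finset.sum_range_succ']
    simp only [List.getD_cons_succ, List.getD_cons_zero, Nat.cast_add, Nat.cast_one,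
      Nat.cast_zero, add_zero]
    rw [add_comm]
    congr 1
    apply Finset.sum_congr rfl
    intro a _
    congr 1
    ring

lemma pvAltEq (nums : List Int) (upper : Int) (h : List.Pairwise (· ≤ ·) nums) :
    countPairsLessEq_alt nums upper =
      ((pvW nums upper 0 ((nums.length : Int) - 1)).card : Int) := by
  unfold countPairsLessEq_alt
  rw [PySem.List.foldl_add]
  have hsum := pvSumEnum nums
    (fun a x => max 0 ((PySem.List.bisectRight nums (upper - x) : Int) - a - 1)) 0
  rw [hsum]
  rw [Finset.card_eq_sum_card_fiberwise
    (f := fun p : Nat × Nat => p.1) (t := Finset.range nums.length)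
    (fun p hp => by
      unfold pvW at hp
      rw [Finset.mem_coe, Finset.mem_filter, Finset.mem_product] at hp
      rw [Finset.mem_coe]
      exact hp.1.1)]
  rw [Nat.cast_sum]
  rw [zero_add]
  apply Finset.sum_congr rfl
  intro a ha
  have han : a < nums.length := Finset.mem_range.mp ha
  obtain ⟨hple, hlt, hge⟩ :=
    PySem.List.bisectRight_spec nums (upper - nums.getD a 0) h
  have hfib : (pvW nums upper 0 ((nums.length : Int) - 1)).filter
        (fun p => p.1 = a) =
      (Finset.Ioo a (PySem.List.bisectRight nums (upper - nums.getD a 0))).image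
        (fun b => (a, b)) := by
    unfold pvW
    ext ⟨a', b⟩
    simp only [Finset.mem_filter, Finset.mem_product, Finset.mem_range,
      Finset.mem_image, Finset.mem_Ioo, Prod.mk.injEq]
    constructor
    · rintro ⟨⟨⟨ha', hb⟩, h1, h2, h3, h4⟩, h5⟩
      subst h5
      refine ⟨b, ⟨h2, ?_⟩, rfl, rfl⟩
      by_contra hpos
      have hbig := hge b hb (by omega)
      have hda := List.getD_eq_getElem nums 0 ha'
      have hdb := List.getD_eq_getElem nums 0 hb
      omega
    · rintro ⟨b', ⟨hb1, hb2⟩, ha', hb⟩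
      subst ha'; subst hb
      have hbn : b' < nums.length := by omega
      have hsmall := hlt b' hbn hb2
      have hda := List.getD_eq_getElem nums 0 han
      have hdb := List.getD_eq_getElem nums 0 hbn
      refine ⟨⟨⟨han, hbn⟩, by omega, hb1, by omega, by omega⟩, rfl⟩
  rw [hfib, Finset.card_image_of_injective _ (fun x y hxy => by simpa using hxy),
    Nat.card_Ioo]
  omega

-- A = B on every sorted list
lemma pvSortedEq (nums : List Int) (upper : Int) (h : List.Pairwise (· ≤ ·) nums) :
    countPairsLessEq nums upper = countPairsLessEq_alt nums upper := by
  unfold countPairsLessEq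
  rw [pvALoop_eq nums upper h 0 ((nums.length : Int) - 1) 0 le_rfl (by omega)]
  rw [pvAltEq nums upper h]
  ring

-- A = B on any two-element list, sorted or not
lemma pvPairEq (a b upper : Int) :
    countPairsLessEq [a, b] upper = countPairsLessEq_alt [a, b] upper := by
  have h11 : ∀ c : Int, pvALoop [a, b] upper 1 1 c = c := by
    intro c; rw [pvALoop]; simp
  have h00 : ∀ c : Int, pvALoop [a, b] upper 0 0 c = c := by
    intro c; rw [pvALoop]; simp
  have hA : countPairsLessEq [a, b] upper = if a + b > upper then 0 else 1 := by
    unfold countPairsLessEq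
    norm_num
    rw [pvALoop]
    simp only [PySem.List.pyGet?, PySem.List.pyIdx?]
    norm_num
    split_ifs with hgt
    · rw [h00]
    · rw [h11]
  have hB : countPairsLessEq_alt [a, b] upper =
      (max 0 ((PySem.List.bisectRight [a, b] (upper - a) : Int) - 1)) +
      (max 0 ((PySem.List.bisectRight [a, b] (upper - b) : Int) - 2)) := by
    unfold countPairsLessEq_alt
    simp [PySem.List.enumerate_cons, PySem.List.enumerate_nil]
    omega
  have hbr : ∀ t : Int, PySem.List.bisectRight [a, b] t =
      if t < b then (if t < a then 0 else 1) else 2 := by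
    intro t
    show PySem.List.bisectRightLoop [a, b] t 2 0 2 = _
    rw [PySem.List.bisectRightLoop]
    norm_num
    split_ifs <;> simp [PySem.List.bisectRightLoop, *]
  rw [hA, hB, hbr, hbr]
  split_ifs <;> omega

-- ===== VERDICT (by name: the statement is the Claim_ definition above) =====
theorem countPairsLessEq_spec : Claim_equal_countPairsLessEq := by
  intro nums upper _ hpre
  unfold Spec_countPairsLessEq
  rcases hpre with hs | hlen
  · exact pvSortedEq nums upper hs
  · match nums with
    | [] => exact pvSortedEq [] upper (by simp)
    | [a] => exact pvSortedEq [a] upper (by simp)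
    | [a, b] => exact pvPairEq a b upper
    | a :: b :: c :: t => simp at hlen
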